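-- pv_equiv track=rewrite | github.com/mrhenrike/WordListsForHacking | wfh_modules/ml_patterns.py | abstract_username
-- ===== SOURCE A (Python) =====
-- def abstract_username(val: str) -> str:
--     """
--     Convert a username to its abstract structural pattern.
--
--     Structural tokens:
--         W  = contiguous alpha run
--         D  = contiguous digit run
--         .  _ - @  = literal separator (preserved)
--         X  = any other character
--
--     Examples:
--         joao.silva     → W.W
--         jsantos        → W
--         j.santos       → W.W
--         svc_backup     → W_W
--         00123456       → D
--         svc01          → WD
--         j.santos01     → W.WD
--         svc-helpdesk   → W-W
--         fn.ln@dom.br   → W.W@W.W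
--
--     Args:
--         val: Raw username/local-part string.
--
--     Returns:
--         Abstract pattern string.
--     """
--     result: list[str] = []
--     i = 0
--     v = val.lower().strip()
--     while i < len(v):
--         c = v[i]
--         if c.isalpha():
--             j = i
--             while j < len(v) and v[j].isalpha():
--                 j += 1
--             result.append("W")
--             i = j
--         elif c.isdigit():
--             j = i
--             while j < len(v) and v[j].isdigit():
--                 j += 1
--             result.append("D")
--             i = j
--         elif c in (".", "_", "-", "@"):
--             result.append(c)
--             i += 1
--         else:
--             result.append("X")
--             i += 1
--     return "".join(result)
-- ===== SOURCE B (Python) =====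
-- def abstract_username(val: str) -> str:
--     # Single pass with a previous-category register: W/D runs collapse to one
--     # token, separators and X chars are emitted per character.
--     v = val.lower().strip()
--     out = []
--     prev = None
--     for c in v:
--         if c.isalpha():
--             cat = "W"
--         elif c.isdigit():
--             cat = "D"
--         elif c in "._-@":
--             cat = c
--         else:
--             cat = "X"
--         if cat in ("W", "D"):
--             if cat != prev:
--                 out.append(cat)
--         else:
--             out.append(cat)
--         prev = cat
--     return "".join(out)
-- ===== Notes on version B (the rewrite author's own statement) =====
-- stated objective: simpler
-- what changed: Replaces A's index-driven while loop with inner run-scanning while-loops by a single for-loop over the characters that classifies each character and collapses W/D runs via a previous-category register (one bounded-work step per character, no per-run inner loops).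
import Mathlib
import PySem

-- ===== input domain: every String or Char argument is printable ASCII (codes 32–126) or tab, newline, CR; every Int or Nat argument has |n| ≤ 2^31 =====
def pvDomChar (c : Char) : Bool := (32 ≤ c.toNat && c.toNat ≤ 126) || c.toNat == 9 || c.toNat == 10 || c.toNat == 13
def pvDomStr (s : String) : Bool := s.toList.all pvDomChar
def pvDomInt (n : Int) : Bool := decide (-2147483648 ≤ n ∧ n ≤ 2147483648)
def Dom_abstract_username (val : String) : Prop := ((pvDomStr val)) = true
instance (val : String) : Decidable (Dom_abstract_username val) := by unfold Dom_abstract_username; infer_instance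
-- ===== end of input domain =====

-- B replaces A's inner run-scanning while-loops by a single classify-and-collapse pass (simpler).

-- ===== PORT A =====
-- inner 'while j < len(v) and v[j].isalpha(): j += 1' (the alpha-run skip), as recursion on the tail
def pvSkipAlpha : List Char → List Char
  | [] => []
  | c :: r => if PySem.Chars.isalpha c then pvSkipAlpha r else c :: r

-- inner 'while j < len(v) and v[j].isdigit(): j += 1'
def pvSkipDigit : List Char → List Char
  | [] => []
  | c :: r => if PySem.Chars.isdigit c then pvSkipDigit r else c :: r

theorem pvSkipAlpha_len (l : List Char) : (pvSkipAlpha l).length ≤ l.length := by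
  induction l with
  | nil => simp [pvSkipAlpha]
  | cons c r ih => simp only [pvSkipAlpha]; split <;> simp; omega

theorem pvSkipDigit_len (l : List Char) : (pvSkipDigit l).length ≤ l.length := by
  induction l with
  | nil => simp [pvSkipDigit]
  | cons c r ih => simp only [pvSkipDigit]; split <;> simp; omega

-- the outer 'while i < len(v)' loop of A, on the remaining characters; result = tokens appended
def pvAGo : List Char → List String
  | [] => []
  | c :: rest =>
    if PySem.Chars.isalpha c then "W" :: pvAGo (pvSkipAlpha rest)
    else if PySem.Chars.isdigit c then "D" :: pvAGo (pvSkipDigit rest)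
    else if c = '.' ∨ c = '_' ∨ c = '-' ∨ c = '@' then String.ofList [c] :: pvAGo rest
    else "X" :: pvAGo rest
termination_by l => l.length
decreasing_by
  · exact Nat.lt_succ_of_le (pvSkipAlpha_len rest)
  · exact Nat.lt_succ_of_le (pvSkipDigit_len rest)
  · simp
  · simp

def abstract_username (val : String) : String :=
  PySem.Str.join "" (pvAGo (PySem.Str.strip (PySem.Str.lower val)).toList)

-- ===== PORT B =====
-- the chain of ifs computing 'cat' in B's loop body
def pvCategory (c : Char) : String :=
  if PySem.Chars.isalpha c then "W"
  else if PySem.Chars.isdigit c then "D"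
  else if c = '.' ∨ c = '_' ∨ c = '-' ∨ c = '@' then String.ofList [c]
  else "X"

-- one iteration of B's for-loop: state = (out, prev)
def pvBStep (s : List String × Option String) (c : Char) : List String × Option String :=
  let cat := pvCategory c
  if cat = "W" ∨ cat = "D" then
    (if some cat ≠ s.2 then s.1 ++ [cat] else s.1, some cat)
  else (s.1 ++ [cat], some cat)

def abstract_username_alt (val : String) : String :=
  PySem.Str.join ""
    ((PySem.Str.strip (PySem.Str.lower val)).toList.foldl pvBStep ([], none)).1

-- ===== PRECONDITION & SPEC =====
def Spec_abstract_username (val : String) (out : String) : Prop := out = abstract_username_alt val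
instance (val : String) (out : String) : Decidable (Spec_abstract_username val out) := by unfold Spec_abstract_username; infer_instance

-- ===== CLAIM (what is proved, stated in full; the proofs are below) =====
def Claim_equal_abstract_username : Prop := ∀ (val : String), Dom_abstract_username val → Spec_abstract_username val (abstract_username val)

-- ===== LEMMAS AND PROOFS =====

theorem pv_alpha_not_digit (c : Char) (h : PySem.Chars.isalpha c = true) :
    PySem.Chars.isdigit c = false := by
  revert h
  simp only [PySem.Chars.isalpha, PySem.Chars.isdigit, PySem.Chars.isupper, PySem.Chars.islower,
    Bool.or_eq_true, Bool.and_eq_true, decide_eq_true_eq, Char.le_def, UInt32.le_iff_toNat_le]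
  intro h
  rcases h with ⟨h1, h2⟩ | ⟨h1, h2⟩ <;> simp_all <;> omega

theorem pvCategory_W (c : Char) : pvCategory c = "W" ↔ PySem.Chars.isalpha c = true := by
  unfold pvCategory
  split
  · simp [*]
  · split
    · simp_all
    · split
      · rcases ‹_ ∨ _ ∨ _ ∨ _› with h | h | h | h <;> subst h <;> simp_all
      · simp_all

theorem pvCategory_D (c : Char) : pvCategory c = "D" ↔ PySem.Chars.isdigit c = true := by
  unfold pvCategory
  split
  · rename_i h
    rw [pv_alpha_not_digit c h]
    simp
  · split
    · simp_all
    · split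
      · rcases ‹_ ∨ _ ∨ _ ∨ _› with h | h | h | h <;> subst h <;> simp_all
      · simp_all

-- the accumulated output only grows at the front: factor it out of the fold
theorem pvBStep_accum (l : List Char) (out : List String) (prev : Option String) :
    l.foldl pvBStep (out, prev) =
      (out ++ (l.foldl pvBStep ([], prev)).1, (l.foldl pvBStep ([], prev)).2) := by
  induction l generalizing out prev with
  | nil => simp
  | cons c r ih =>
    simp only [List.foldl_cons]
    rw [ih (pvBStep (out, prev) c).1 (pvBStep (out, prev) c).2,
        ih (pvBStep ([], prev) c).1 (pvBStep ([], prev) c).2]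
    have h2 : (pvBStep (out, prev) c).2 = (pvBStep ([], prev) c).2 := by
      simp only [pvBStep]; split <;> rfl
    have h1 : (pvBStep (out, prev) c).1 = out ++ (pvBStep ([], prev) c).1 := by
      simp only [pvBStep]
      split
      · by_cases hp : some (pvCategory c) ≠ prev <;> simp [hp]
      · simp
    rw [h1, h2, List.append_assoc]

-- with prev = "W", B's fold ignores the whole alpha run
theorem pvBFold_skipAlpha (l : List Char) (out : List String) :
    l.foldl pvBStep (out, some "W") = (pvSkipAlpha l).foldl pvBStep (out, some "W") := by
  induction l generalizing out with
  | nil => simp [pvSkipAlpha]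
  | cons c r ih =>
    simp only [pvSkipAlpha]
    by_cases h : PySem.Chars.isalpha c = true
    · have hc : pvCategory c = "W" := (pvCategory_W c).mpr h
      simp only [h, if_pos, List.foldl_cons, pvBStep, hc]
      simpa using ih out
    · simp [h]

-- with prev = "D", B's fold ignores the whole digit run
theorem pvBFold_skipDigit (l : List Char) (out : List String) :
    l.foldl pvBStep (out, some "D") = (pvSkipDigit l).foldl pvBStep (out, some "D") := by
  induction l generalizing out with
  | nil => simp [pvSkipDigit]
  | cons c r ih =>
    simp only [pvSkipDigit]
    by_cases h : PySem.Chars.isdigit c = true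
    · have hc : pvCategory c = "D" := (pvCategory_D c).mpr h
      simp only [h, if_pos, List.foldl_cons, pvBStep, hc]
      simpa using ih out
    · simp [h]

theorem pvSkipAlpha_head (l : List Char) (c : Char) (h : (pvSkipAlpha l).head? = some c) :
    PySem.Chars.isalpha c = false := by
  induction l with
  | nil => simp [pvSkipAlpha] at h
  | cons d r ih =>
    simp only [pvSkipAlpha] at h
    by_cases hd : PySem.Chars.isalpha d = true
    · exact ih (by simpa [hd] using h)
    · simp [hd] at h
      subst h
      simpa using hd

theorem pvSkipDigit_head (l : List Char) (c : Char) (h : (pvSkipDigit l).head? = some c) :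
    PySem.Chars.isdigit c = false := by
  induction l with
  | nil => simp [pvSkipDigit] at h
  | cons d r ih =>
    simp only [pvSkipDigit] at h
    by_cases hd : PySem.Chars.isdigit d = true
    · exact ih (by simpa [hd] using h)
    · simp [hd] at h
      subst h
      simpa using hd

-- main list-level equivalence: as long as prev cannot absorb the head's token,
-- B's single pass produces exactly A's token list
theorem pvGo_eq (l : List Char) (prev : Option String)
    (ha : ∀ c, l.head? = some c → PySem.Chars.isalpha c = true → prev ≠ some "W")
    (hd : ∀ c, l.head? = some c → PySem.Chars.isdigit c = true → prev ≠ some "D") :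
    (l.foldl pvBStep ([], prev)).1 = pvAGo l := by
  match l with
  | [] => simp [pvAGo]
  | c :: rest =>
    by_cases hW : PySem.Chars.isalpha c = true
    · have hc : pvCategory c = "W" := (pvCategory_W c).mpr hW
      have hne : prev ≠ some "W" := ha c rfl hW
      have hstep : pvBStep ([], prev) c = (["W"], some "W") := by
        simp [pvBStep, hc]
        intro h; exact absurd h.symm hne
      rw [pvAGo, if_pos hW, List.foldl_cons, hstep, pvBFold_skipAlpha,
          pvBStep_accum _ ["W"] (some "W")]
      have ih := pvGo_eq (pvSkipAlpha rest) (some "W")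
        (fun d hdd hdal => absurd (pvSkipAlpha_head rest d hdd) (by simp [hdal]))
        (fun d _ _ => by simp)
      simp [ih]
    · by_cases hD : PySem.Chars.isdigit c = true
      · have hc : pvCategory c = "D" := (pvCategory_D c).mpr hD
        have hne : prev ≠ some "D" := hd c rfl hD
        have hstep : pvBStep ([], prev) c = (["D"], some "D") := by
          simp [pvBStep, hc]
          intro h; exact absurd h.symm hne
        rw [pvAGo, if_neg (by simp [hW]), if_pos hD, List.foldl_cons, hstep,
            pvBFold_skipDigit, pvBStep_accum _ ["D"] (some "D")]
        have ih := pvGo_eq (pvSkipDigit rest) (some "D")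
          (fun d _ _ => by simp)
          (fun d hdd hddig => absurd (pvSkipDigit_head rest d hdd) (by simp [hddig]))
        simp [ih]
      · -- separator / X: B emits the category unconditionally, exactly A's token
        have hcW : pvCategory c ≠ "W" := fun h => hW ((pvCategory_W c).mp h)
        have hcD : pvCategory c ≠ "D" := fun h => hD ((pvCategory_D c).mp h)
        have hstep : pvBStep ([], prev) c = ([pvCategory c], some (pvCategory c)) := by
          simp [pvBStep, hcW, hcD]
        have ih := pvGo_eq rest (some (pvCategory c))
          (fun d _ _ h => hcW (by injection h))
          (fun d _ _ h => hcD (by injection h))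
        rw [List.foldl_cons, hstep, pvBStep_accum _ [pvCategory c] (some (pvCategory c))]
        rw [pvAGo, if_neg (by simp [hW]), if_neg (by simp [hD])]
        by_cases hsep : c = '.' ∨ c = '_' ∨ c = '-' ∨ c = '@'
        · have hce : pvCategory c = String.ofList [c] := by
            simp [pvCategory, hW, hD, hsep]
          rw [hce] at ih
          simp [hsep, hce, ih]
        · have hce : pvCategory c = "X" := by simp [pvCategory, hW, hD, hsep]
          rw [hce] at ih
          simp [hsep, hce, ih]
termination_by l.length
decreasing_by
  · exact Nat.lt_succ_of_le (pvSkipAlpha_len rest)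
  · exact Nat.lt_succ_of_le (pvSkipDigit_len rest)
  · simp

-- ===== VERDICT (by name: the statement is the Claim_ definition above) =====
theorem abstract_username_spec : Claim_equal_abstract_username := by
  intro val _
  unfold Spec_abstract_username abstract_username abstract_username_alt
  rw [pvGo_eq _ none (by simp) (by simp)]
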